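-- pv_equiv track=rewrite | github.com/Tului2020/Finite-Difference-Method | Winter 2017/Shooting Method Bending/IC_Tridiagonal_Method.py | create_five
-- ===== SOURCE A (Python) =====
-- n = 100
--
-- def create_five(n1=n):
--     ret = [[0]*n1 for i in range(n1)]
--     for row in range(2, n1-2):
--         for col in range(n1):
--             if row == col:
--                 ret[row][col] = 6
--             elif abs(row-col) == 1:
--                 ret[row][col] = -4
--             elif abs(row - col) == 2:
--                 ret[row][col] = 1
--     return ret
-- ===== SOURCE B (Python) =====
-- n = 100
--
-- def create_five(n1=n):
--     def row(r):
--         if 2 <= r <= n1 - 3: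
--             return [0] * (r - 2) + [1, -4, 6, -4, 1] + [0] * (n1 - r - 3)
--         return [0] * n1
--     return [row(r) for r in range(n1)]
-- ===== Notes on version B (the rewrite author's own statement) =====
-- stated objective: faster
-- what changed: Instead of zero-initialising an n x n matrix and testing every (row,col) pair against the three band conditions with in-place assignment, B builds each row directly by concatenating zero-padding with the fixed five-entry stencil [1,-4,6,-4,1] (zero rows elsewhere), with no per-cell branching and no mutation.
import Mathlib
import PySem

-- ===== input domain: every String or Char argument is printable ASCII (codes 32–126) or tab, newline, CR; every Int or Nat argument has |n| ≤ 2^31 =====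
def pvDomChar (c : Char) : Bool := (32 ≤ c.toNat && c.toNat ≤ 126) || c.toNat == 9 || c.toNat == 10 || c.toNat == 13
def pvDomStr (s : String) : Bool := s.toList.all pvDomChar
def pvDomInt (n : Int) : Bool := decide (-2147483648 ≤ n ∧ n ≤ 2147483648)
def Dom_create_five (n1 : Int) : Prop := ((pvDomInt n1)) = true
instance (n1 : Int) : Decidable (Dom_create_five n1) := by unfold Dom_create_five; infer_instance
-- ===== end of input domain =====

-- B builds each row directly as padding ++ [1,-4,6,-4,1] ++ padding instead of
-- zero-filling an n×n matrix and testing every (row, col) pair (constant-factor speed-up).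

-- ===== PORT A =====
def create_five (n1 : Int) : List (List Int) :=
  let ret : List (List Int) := List.replicate n1.toNat (List.replicate n1.toNat (0 : Int))
  (PySem.List.pyRange 2 (n1 - 2) 1).foldl (fun ret row =>
    (PySem.List.pyRange 0 n1 1).foldl (fun ret col =>
      if row == col then
        ret.modify row.toNat (fun rw => rw.set col.toNat 6)
      else if (row - col).natAbs == 1 then
        ret.modify row.toNat (fun rw => rw.set col.toNat (-4))
      else if (row - col).natAbs == 2 then
        ret.modify row.toNat (fun rw => rw.set col.toNat 1)
      else ret) ret) ret

-- ===== PORT B =====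
def create_five_alt (n1 : Int) : List (List Int) :=
  (PySem.List.pyRange 0 n1 1).map (fun r =>
    if 2 ≤ r ∧ r ≤ n1 - 3 then
      List.replicate (r - 2).toNat (0 : Int) ++ [1, -4, 6, -4, 1] ++
        List.replicate (n1 - r - 3).toNat (0 : Int)
    else List.replicate n1.toNat (0 : Int))

-- ===== PRECONDITION & SPEC =====
def Spec_create_five (n1 : Int) (out : List (List Int)) : Prop := out = create_five_alt n1
instance (n1 : Int) (out : List (List Int)) : Decidable (Spec_create_five n1 out) := by unfold Spec_create_five; infer_instance

-- ===== CLAIM (what is proved, stated in full; the proofs are below) =====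
def Claim_equal_create_five : Prop := ∀ (n1 : Int), Dom_create_five n1 → Spec_create_five n1 (create_five n1)

-- ===== LEMMAS AND PROOFS =====

/-- The body of A's inner loop acting on the selected row. -/
def cfStepRow (row : Int) (rw : List Int) (col : Int) : List Int :=
  if row == col then rw.set col.toNat 6
  else if (row - col).natAbs == 1 then rw.set col.toNat (-4)
  else if (row - col).natAbs == 2 then rw.set col.toNat 1
  else rw

/-- The value A's inner loop writes at column `col` of row `row` (over an old entry `x`). -/
def cfEntry (row col : Int) (x : Int) : Int :=
  if row = col then 6
  else if (row - col).natAbs = 1 then -4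
  else if (row - col).natAbs = 2 then 1
  else x

/-- A's inner loop only touches the row it indexes: it factors through `List.modify`. -/
lemma cf_inner_factor (row : Int) (L : List Int) (m : List (List Int)) :
    L.foldl (fun ret col =>
      if row == col then
        ret.modify row.toNat (fun rw => rw.set col.toNat 6)
      else if (row - col).natAbs == 1 then
        ret.modify row.toNat (fun rw => rw.set col.toNat (-4))
      else if (row - col).natAbs == 2 then
        ret.modify row.toNat (fun rw => rw.set col.toNat 1)
      else ret) m
    = m.modify row.toNat (fun rw => L.foldl (cfStepRow row) rw) := by
  induction L generalizing m with
  | nil => exact (List.modify_id row.toNat m).symm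
  | cons c L ih =>
      simp only [List.foldl_cons]
      have hstep : (if row == c then
            m.modify row.toNat (fun rw => rw.set c.toNat 6)
          else if (row - c).natAbs == 1 then
            m.modify row.toNat (fun rw => rw.set c.toNat (-4))
          else if (row - c).natAbs == 2 then
            m.modify row.toNat (fun rw => rw.set c.toNat 1)
          else m)
          = m.modify row.toNat (fun rw => cfStepRow row rw c) := by
        unfold cfStepRow
        split_ifs <;> first | rfl | exact (List.modify_id _ _).symm
      rw [hstep, ih, List.modify_modify_eq]
      rfl

/-- One step of the inner loop read at an index it does not write. -/
lemma cfStepRow_getElem_ne (row a : Int) (rw : List Int) (c : Nat) (ha : 0 ≤ a)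
    (h : (c : Int) ≠ a) : (cfStepRow row rw a)[c]? = rw[c]? := by
  have hc : a.toNat ≠ c := by omega
  unfold cfStepRow
  split_ifs <;> simp [List.getElem?_set_ne hc]

/-- One step of the inner loop read at the index it writes (`0 ≤ a`). -/
lemma cfStepRow_getElem_eq (row a : Int) (rw : List Int) :
    (cfStepRow row rw a)[a.toNat]? = rw[a.toNat]?.map (cfEntry row a) := by
  have hset : ∀ (v : Int), (rw.set a.toNat v)[a.toNat]? = rw[a.toNat]?.map (fun _ => v) := by
    intro v
    rw [List.getElem?_set_self']
    rfl
  unfold cfStepRow cfEntry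
  simp only [beq_iff_eq]
  split_ifs <;> first | exact hset _ | simp

/-- Entry characterisation of the inner loop over `range(a, n1)`. -/
lemma cf_inner_get (n1 row : Int) :
    ∀ (k : Nat) (a : Int) (rw : List Int) (c : Nat), (n1 - a).toNat = k → 0 ≤ a →
      ((PySem.List.pyRange a n1 1).foldl (cfStepRow row) rw)[c]?
        = if a ≤ (c : Int) ∧ (c : Int) < n1 then rw[c]?.map (cfEntry row (c : Int)) else rw[c]? := by
  intro k
  induction k with
  | zero =>
      intro a rw c hk ha
      rw [PySem.List.pyRange_one_eq_nil (by omega)]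
      simp only [List.foldl_nil]
      rw [if_neg (by omega)]
  | succ k ih =>
      intro a rw c hk ha
      rw [PySem.List.pyRange_one_cons (by omega), List.foldl_cons]
      rw [ih (a + 1) (cfStepRow row rw a) c (by omega) (by omega)]
      by_cases hca : (c : Int) = a
      · rw [if_neg (by omega), if_pos (by omega)]
        have h : a.toNat = c := by omega
        rw [← h, cfStepRow_getElem_eq row a rw, h, hca]
      · rw [cfStepRow_getElem_ne row a rw c ha hca]
        by_cases h : a + 1 ≤ (c : Int) ∧ (c : Int) < n1
        · rw [if_pos h, if_pos (by omega)]
        · rw [if_neg h, if_neg (by omega)]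

/-- B's interior row, read entrywise, is exactly what A writes over a zero entry. -/
lemma cf_pattern_get (n1 row : Int) (h2 : 2 ≤ row) (h3 : row ≤ n1 - 3) (c : Nat) :
    (List.replicate (row - 2).toNat (0 : Int) ++ [1, -4, 6, -4, 1] ++
      List.replicate (n1 - row - 3).toNat (0 : Int))[c]?
    = if (c : Int) < n1 then some (cfEntry row (c : Int) 0) else none := by
  have hE : ∀ (x : Int), cfEntry row (c : Int) x
      = if row = (c : Int) then 6
        else if (row - (c : Int)).natAbs = 1 then -4
        else if (row - (c : Int)).natAbs = 2 then 1 else x := fun _ => rfl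
  have hlen1 : (List.replicate (row - 2).toNat (0 : Int)).length = (row - 2).toNat := by simp
  have hlen2 : (List.replicate (row - 2).toNat (0 : Int) ++ [1, -4, 6, -4, 1]).length
      = (row - 2).toNat + 5 := by simp
  rcases lt_or_ge (c : Int) (row - 2) with hc1 | hc1
  · -- left zero padding
    rw [List.getElem?_append_left (by rw [hlen2]; omega),
      List.getElem?_append_left (by rw [hlen1]; omega), List.getElem?_replicate]
    rw [if_pos (by omega), if_pos (by omega), hE]
    rw [if_neg (by omega), if_neg (by omega), if_neg (by omega)]
  · rcases lt_or_ge (c : Int) (row + 3) with hc2 | hc2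
    · -- the five stencil entries
      rw [List.getElem?_append_left (by rw [hlen2]; omega),
        List.getElem?_append_right (by rw [hlen1]; omega)]
      rw [if_pos (by omega), hE, hlen1]
      have h5 : c - (row - 2).toNat = 0 ∨ c - (row - 2).toNat = 1 ∨ c - (row - 2).toNat = 2 ∨
          c - (row - 2).toNat = 3 ∨ c - (row - 2).toNat = 4 := by omega
      rcases h5 with h | h | h | h | h <;> rw [h] <;> simp only [List.getElem?_cons_zero,
        List.getElem?_cons_succ] <;>
        [ (rw [if_neg (by omega), if_neg (by omega), if_pos (by omega)]);
          (rw [if_neg (by omega), if_pos (by omega)]);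
          (rw [if_pos (by omega)]);
          (rw [if_neg (by omega), if_pos (by omega)]);
          (rw [if_neg (by omega), if_neg (by omega), if_pos (by omega)]) ]
    · rcases lt_or_ge (c : Int) n1 with hc3 | hc3
      · -- right zero padding
        rw [List.getElem?_append_right (by rw [hlen2]; omega), List.getElem?_replicate, hlen2]
        rw [if_pos (by omega), if_pos (by omega), hE]
        rw [if_neg (by omega), if_neg (by omega), if_neg (by omega)]
      · -- past the end of the row
        rw [if_neg (by omega), List.getElem?_eq_none (by simp; omega)]

/-- A's finished interior row equals B's concatenated row. -/
lemma cf_row_eq (n1 row : Int) (h2 : 2 ≤ row) (h3 : row ≤ n1 - 3) :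
    (PySem.List.pyRange 0 n1 1).foldl (cfStepRow row) (List.replicate n1.toNat (0 : Int))
      = List.replicate (row - 2).toNat (0 : Int) ++ [1, -4, 6, -4, 1] ++
          List.replicate (n1 - row - 3).toNat (0 : Int) := by
  apply List.ext_getElem?
  intro c
  rw [cf_inner_get n1 row (n1 - 0).toNat 0 _ c rfl le_rfl, cf_pattern_get n1 row h2 h3 c]
  by_cases h : (c : Int) < n1
  · rw [if_pos ⟨by omega, h⟩, if_pos h, List.getElem?_replicate, if_pos (by omega)]
    rfl
  · rw [if_neg (by omega), if_neg h, List.getElem?_replicate, if_neg (by omega)]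

/-- Row characterisation of A's outer loop over `range(a, n1-2)`. -/
lemma cf_outer_get (n1 : Int) :
    ∀ (k : Nat) (a : Int) (m : List (List Int)) (j : Nat), (n1 - 2 - a).toNat = k → 0 ≤ a →
      ((PySem.List.pyRange a (n1 - 2) 1).foldl (fun m row =>
          m.modify row.toNat (fun rw => (PySem.List.pyRange 0 n1 1).foldl (cfStepRow row) rw)) m)[j]?
        = if a ≤ (j : Int) ∧ (j : Int) < n1 - 2 then
            m[j]?.map (fun rw => (PySem.List.pyRange 0 n1 1).foldl (cfStepRow (j : Int)) rw)
          else m[j]? := by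
  intro k
  induction k with
  | zero =>
      intro a m j hk ha
      rw [show PySem.List.pyRange a (n1 - 2) 1 = [] from PySem.List.pyRange_one_eq_nil (by omega)]
      simp only [List.foldl_nil]
      rw [if_neg (by omega)]
  | succ k ih =>
      intro a m j hk ha
      rw [show PySem.List.pyRange a (n1 - 2) 1 = a :: PySem.List.pyRange (a + 1) (n1 - 2) 1 from
        PySem.List.pyRange_one_cons (by omega), List.foldl_cons]
      rw [ih (a + 1) _ j (by omega) (by omega)]
      by_cases hja : (j : Int) = a
      · rw [if_neg (by omega), if_pos (by omega)]
        have hn : a.toNat = j := by omega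
        rw [← hn, List.getElem?_modify_eq, hn, hja]
        rfl
      · have hn : a.toNat ≠ j := by omega
        rw [List.getElem?_modify_ne _ _ hn]
        by_cases h : a + 1 ≤ (j : Int) ∧ (j : Int) < n1 - 2
        · rw [if_pos h, if_pos (by omega)]
        · rw [if_neg h, if_neg (by omega)]

lemma cf_main (n1 : Int) : create_five n1 = create_five_alt n1 := by
  unfold create_five create_five_alt
  have hfac : (fun (ret : List (List Int)) (row : Int) =>
      (PySem.List.pyRange 0 n1 1).foldl (fun ret col =>
        if row == col then
          ret.modify row.toNat (fun rw => rw.set col.toNat 6)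
        else if (row - col).natAbs == 1 then
          ret.modify row.toNat (fun rw => rw.set col.toNat (-4))
        else if (row - col).natAbs == 2 then
          ret.modify row.toNat (fun rw => rw.set col.toNat 1)
        else ret) ret)
      = (fun (m : List (List Int)) (row : Int) =>
          m.modify row.toNat (fun rw => (PySem.List.pyRange 0 n1 1).foldl (cfStepRow row) rw)) := by
    funext m row
    exact cf_inner_factor row _ m
  rw [hfac]
  apply List.ext_getElem?
  intro j
  rw [cf_outer_get n1 (n1 - 2 - 2).toNat 2 _ j rfl (by omega)]
  rw [List.getElem?_map, List.getElem?_replicate, PySem.List.getElem?_pyRange_one]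
  by_cases hj : j < n1.toNat
  · by_cases hband : 2 ≤ (j : Int) ∧ (j : Int) < n1 - 2
    · rw [if_pos hband, if_pos (show j < n1.toNat from hj),
        if_pos (show j < (n1 - 0).toNat by omega)]
      simp only [Option.map_some, zero_add]
      rw [if_pos (show 2 ≤ (j : Int) ∧ (j : Int) ≤ n1 - 3 by omega)]
      exact congrArg some (cf_row_eq n1 (j : Int) (by omega) (by omega))
    · rw [if_neg hband, if_pos (show j < n1.toNat from hj),
        if_pos (show j < (n1 - 0).toNat by omega)]
      simp only [Option.map_some, zero_add]
      rw [if_neg (show ¬(2 ≤ (j : Int) ∧ (j : Int) ≤ n1 - 3) by omega)]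
  · rw [if_neg (show ¬(2 ≤ (j : Int) ∧ (j : Int) < n1 - 2) by omega),
      if_neg (show ¬j < n1.toNat from hj), if_neg (show ¬j < (n1 - 0).toNat by omega)]
    simp

-- ===== VERDICT (by name: the statement is the Claim_ definition above) =====
theorem create_five_spec : Claim_equal_create_five := by
  intro n1 _
  unfold Spec_create_five
  exact cf_main n1
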